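-- pv_equiv track=rewrite | github.com/IgorMonardez/grafos | PaisesEmGuerra.py | define_custos
-- ===== SOURCE A (Python) =====
-- INFTY = 99999999
--
-- def define_custos(n, e):
--     custo = []
--     for i in range(n):
--         linha = []
--         for j in range(n):
--             if i == j:
--                 linha.append(0)
--             else:
--                 linha.append(INFTY)
--         custo.append(linha)
--     return custo
-- ===== SOURCE B (Python) =====
-- INFTY = 99999999
--
-- def define_custos(n, e):
--     # Tile the pattern [0, INFTY, ..., INFTY] (length n+1) n times; consecutive
--     # length-n slices of the tiling shift the 0 one step right, tracing the diagonal.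
--     flat = ([0] + [INFTY] * n) * n
--     return [flat[i * n:(i + 1) * n] for i in range(n)]
-- ===== Notes on version B (the rewrite author's own statement) =====
-- stated objective: alternative
-- what changed: Instead of a branching double loop, B tiles the length-(n+1) pattern [0]+[INFTY]*n n times into one flat list and slices each row out of it, exploiting that consecutive length-n slices shift the 0 along the diagonal.
import Mathlib
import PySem

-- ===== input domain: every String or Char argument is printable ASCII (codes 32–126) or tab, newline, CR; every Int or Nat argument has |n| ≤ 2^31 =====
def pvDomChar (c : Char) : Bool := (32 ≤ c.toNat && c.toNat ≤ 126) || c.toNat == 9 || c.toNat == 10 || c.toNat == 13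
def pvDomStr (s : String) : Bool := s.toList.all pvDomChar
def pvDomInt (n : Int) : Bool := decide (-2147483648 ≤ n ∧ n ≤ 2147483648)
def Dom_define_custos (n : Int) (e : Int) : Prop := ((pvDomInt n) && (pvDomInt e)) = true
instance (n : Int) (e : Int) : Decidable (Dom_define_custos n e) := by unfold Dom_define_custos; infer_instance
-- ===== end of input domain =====

-- B tiles the length-(n+1) pattern [0, INFTY, …, INFTY] n times into one flat list and
-- slices each row out of it (the 0 shifts one step right per row), instead of A's
-- branching double loop; objective: alternative.

-- ===== PORT A =====
def define_custos (n : Int) (e : Int) : List (List Int) :=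
  (PySem.List.pyRange 0 n 1).foldl (fun custo i =>
    custo ++ [(PySem.List.pyRange 0 n 1).foldl (fun linha j =>
      linha ++ [if i == j then (0 : Int) else 99999999]) []]) []

-- ===== PORT B =====
def define_custos_alt (n : Int) (e : Int) : List (List Int) :=
  let flat := (List.replicate n.toNat ((0 : Int) :: List.replicate n.toNat 99999999)).flatten
  (PySem.List.pyRange 0 n 1).map (fun i =>
    PySem.List.slice flat (some (i * n)) (some ((i + 1) * n)))

-- ===== PRECONDITION & SPEC =====
def Spec_define_custos (n : Int) (e : Int) (out : List (List Int)) : Prop := out = define_custos_alt n e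
instance (n : Int) (e : Int) (out : List (List Int)) : Decidable (Spec_define_custos n e out) := by unfold Spec_define_custos; infer_instance

-- ===== CLAIM =====
def Claim_equal_define_custos : Prop := ∀ (n : Int) (e : Int), Dom_define_custos n e → Spec_define_custos n e (define_custos n e)

-- ===== LEMMAS AND PROOFS =====

-- element k of a tiling of pattern p is p[k % |p|]
lemma flat_get? {α : Type} (p : List α) : ∀ (m k : Nat), k < m * p.length →
    ((List.replicate m p).flatten)[k]? = p[k % p.length]? := by
  intro m
  induction m with
  | zero => intro k hk; rw [Nat.zero_mul] at hk; omega
  | succ m ih =>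
    intro k hk
    rw [Nat.succ_mul] at hk
    rw [List.replicate_succ, List.flatten_cons]
    by_cases h : k < p.length
    · rw [List.getElem?_append_left h, Nat.mod_eq_of_lt h]
    · rw [List.getElem?_append_right (le_of_not_gt h)]
      rw [ih (k - p.length) (by omega)]
      rw [Nat.mod_eq_sub_mod (le_of_not_gt h)]

-- the pattern's entries
lemma pat_get? (m r : Nat) (hr : r < m + 1) :
    (((0 : Int) :: List.replicate m (99999999 : Int)))[r]? =
      some (if r = 0 then (0 : Int) else 99999999) := by
  cases r with
  | zero => simp
  | succ r =>
    have hrm : r < m := by omega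
    simp [hrm]

-- row i of B's flat tiling equals A's branching row
lemma row_eq (m i : Nat) (hi : i < m) :
    ((((List.replicate m ((0 : Int) :: List.replicate m 99999999)).flatten).drop (i * m)).take m)
      = (List.range m).map (fun (j : Nat) => if ((i : Int) == (j : Int)) then (0 : Int) else 99999999) := by
  have hlen : ((List.replicate m ((0 : Int) :: List.replicate m 99999999)).flatten).length
      = m * (m + 1) := by
    simp [List.length_flatten, List.map_replicate, List.sum_replicate]
  have hle : i * m + m ≤ m * (m + 1) := by nlinarith
  apply List.ext_getElem
  · simp [hlen]; omega
  · intro j hj hj'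
    simp only [List.length_take, List.length_drop, hlen, lt_min_iff] at hj
    have hj'' : j < m := hj.1
    rw [List.getElem_take, List.getElem_drop]
    simp only [List.getElem_map, List.getElem_range]
    have hb : i * m + j < ((List.replicate m ((0 : Int) :: List.replicate m 99999999)).flatten).length := by
      rw [hlen]; omega
    have hfg := flat_get? ((0 : Int) :: List.replicate m 99999999) m (i * m + j)
      (by simp only [List.length_cons, List.length_replicate]; nlinarith)
    simp only [List.length_cons, List.length_replicate] at hfg
    have hget : ((List.replicate m ((0 : Int) :: List.replicate m 99999999)).flatten)[i * m + j]?
        = some (if (i * m + j) % (m + 1) = 0 then (0 : Int) else 99999999) := by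
      rw [hfg]
      exact pat_get? m _ (Nat.mod_lt _ (by omega))
    have hgetE : ((List.replicate m ((0 : Int) :: List.replicate m 99999999)).flatten)[i * m + j]'hb
        = if (i * m + j) % (m + 1) = 0 then (0 : Int) else 99999999 := by
      rw [List.getElem?_eq_getElem hb] at hget
      exact Option.some.inj hget
    rw [hgetE]
    -- (i*m+j) % (m+1) = 0 iff i = j, for i,j < m
    have hmod : (i * m + j) % (m + 1) = 0 ↔ i = j := by
      constructor
      · intro h
        by_cases hij : i ≤ j
        · have heq : i * m + j = (m + 1) * i + (j - i) := by zify [hij]; ring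
          rw [heq, Nat.mul_add_mod] at h
          rw [Nat.mod_eq_of_lt (by omega)] at h
          omega
        · have h1 : 1 ≤ i := by omega
          have h2 : i ≤ m + 1 + j := by omega
          have heq : i * m + j = (m + 1) * (i - 1) + (m + 1 + j - i) := by
            zify [h1, h2]; ring
          rw [heq, Nat.mul_add_mod] at h
          rw [Nat.mod_eq_of_lt (by omega)] at h
          omega
      · intro h
        rw [h]
        have heq : j * m + j = j * (m + 1) := by ring
        rw [heq, Nat.mul_mod_left]
    by_cases hij : i = j
    · rw [if_pos (hmod.mpr hij), if_pos (by simp [hij])]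
    · rw [if_neg (fun hc => hij (hmod.mp hc)), if_neg (by simpa using hij)]

theorem define_custos_spec : Claim_equal_define_custos := by
  intro n e _
  unfold Spec_define_custos define_custos define_custos_alt
  rw [PySem.List.pyRange_zero]
  by_cases hn : 0 < n
  · have hcast : (n.toNat : Int) = n := Int.toNat_of_nonneg (le_of_lt hn)
    set m := n.toNat with hm
    rw [List.foldl_map, List.map_map]
    rw [PySem.List.foldl_append_singleton_eq_map]
    simp only [List.nil_append]
    apply List.ext_getElem
    · simp
    · intro i hi hi'
      simp only [List.length_map, List.length_range] at hi
      simp only [List.getElem_map, List.getElem_range, Function.comp_def]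
      rw [List.foldl_map, PySem.List.foldl_append_singleton_eq_map, List.nil_append]
      have hb1 : (i : Int) * n = ((i * m : Nat) : Int) := by
        rw [← hcast]; push_cast; ring
      have hb2 : ((i : Int) + 1) * n = ((i * m : Nat) : Int) + ((m : Nat) : Int) := by
        rw [← hcast]; push_cast; ring
      rw [hb1, hb2, PySem.List.slice_natCast_add]
      exact (row_eq m i hi).symm
  · have hm0 : n.toNat = 0 := by omega
    simp [hm0]

-- ===== VERDICT (by name: the statement is the Claim_ definition above) =====
-- (theorem define_custos_spec above proves Claim_equal_define_custos)
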